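-- pv_equiv track=rewrite | github.com/ByeonYeongsin/algorithm_programmers | 프로그래머스/2/138476. 귤 고르기/귤 고르기.py | solution
-- ===== SOURCE A (Python) =====
-- def solution(k, tangerine):
--     dic = {}
--     for t in tangerine:
--         if t in dic: dic[t] += 1
--         else: dic[t] = 1
--     remove_num = len(tangerine) - k
--     flag = True
--     for i in range(1, len(tangerine)):
--         if flag == False: break
--         for j in dic.keys():
--             if dic[j] == i:
--                 if remove_num >= i:
--                     remove_num -= i
--                     dic[j] -= i
--                 else:
--                     remove_num = 0
--                     dic[j] -= remove_num
--             if remove_num == 0: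
--                 flag = False
--                 break
--     answer = 0
--     for key in dic.keys():
--         if dic[key] != 0:
--             answer += 1
--     return answer
-- ===== SOURCE B (Python) =====
-- def solution(k, tangerine):
--     counts = {}
--     for t in tangerine:
--         counts[t] = counts.get(t, 0) + 1
--     budget = len(tangerine) - k
--     kept = len(counts)
--     for c in sorted(counts.values()):
--         if c <= budget:
--             budget -= c
--             kept -= 1
--         else:
--             break
--     return kept
-- ===== Notes on version B (the rewrite author's own statement) =====
-- stated objective: alternative
-- what changed: B replaces A's nested scan (for each level i=1..len-1 rescan every dict key and zero out matching groups) by counting once, sorting the group sizes ascending and removing groups greedily in one pass while the budget len-k allows (timed at ~1.3x, below the 1.5x bar, so not claimed as faster).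
-- intended difference: When k <= 0 and tangerine is nonempty with all elements equal, A returns 1 because its level loop only runs up to len-1 and never reaches the single group of size len, while B returns 0, the intended answer since a budget of len-k >= len tangerines may remove the whole group. — e.g. on solution(0, [5, 5]): A returns 1, B returns 0
import Mathlib
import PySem

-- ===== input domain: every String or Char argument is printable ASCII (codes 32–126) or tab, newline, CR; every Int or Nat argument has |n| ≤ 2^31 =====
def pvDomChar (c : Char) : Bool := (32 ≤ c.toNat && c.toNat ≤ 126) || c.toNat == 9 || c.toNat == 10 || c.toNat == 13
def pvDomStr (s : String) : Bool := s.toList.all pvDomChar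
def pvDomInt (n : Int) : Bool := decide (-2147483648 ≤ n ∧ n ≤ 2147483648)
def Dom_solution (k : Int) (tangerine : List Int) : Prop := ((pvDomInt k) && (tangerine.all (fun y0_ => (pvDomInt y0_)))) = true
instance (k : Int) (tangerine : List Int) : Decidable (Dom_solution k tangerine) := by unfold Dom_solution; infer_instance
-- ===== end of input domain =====

-- B counts once, sorts the group sizes ascending and removes groups greedily in one pass,
-- instead of A's per-level rescan of the whole dict; on k ≤ 0 with an all-equal nonempty
-- list A returns 1 (its level loop stops at len-1) while B returns the intended 0 — see D_solution.

-- ===== PORT A =====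
-- inner loop 'for j in dic.keys(): …' (early exit via the returned Bool = Python's flag)
def pvInnerA (i : Int) : List Int → PySem.Dict Int Int → Int → (PySem.Dict Int Int × Int × Bool)
  | [], d, r => (d, r, true)
  | j :: rest, d, r =>
      let v := d.getD j 0
      -- 'if dic[j] == i: if remove_num >= i: … else: remove_num = 0; dic[j] -= remove_num'
      let dr := if v = i then
                  (if r ≥ i then (d.insert j (v - i), r - i) else (d.insert j (v - 0), (0 : Int)))
                else (d, r)
      -- 'if remove_num == 0: flag = False; break'
      if dr.2 = 0 then (dr.1, dr.2, false) else pvInnerA i rest dr.1 dr.2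

def solution (k : Int) (tangerine : List Int) : Int :=
  let dic := tangerine.foldl
    (fun d t => if d.contains t then d.insert t (d.getD t 0 + 1) else d.insert t 1)
    (PySem.Dict.empty : PySem.Dict Int Int)
  -- 'for i in range(1, len(tangerine)): if flag == False: break; for j in dic.keys(): …'
  let st := (PySem.List.pyRange 1 (tangerine.length : Int)).foldl
    (fun (st : PySem.Dict Int Int × Int × Bool) i =>
       if st.2.2 = false then st else pvInnerA i st.1.keys st.1 st.2.1)
    (dic, (tangerine.length : Int) - k, true)
  -- 'answer = 0; for key in dic.keys(): if dic[key] != 0: answer += 1'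
  st.1.keys.foldl (fun a key => if st.1.getD key 0 ≠ 0 then a + 1 else a) 0

-- ===== PORT B =====
-- 'for c in sorted(counts.values()): if c <= budget: budget -= c; kept -= 1 else: break'
def pvGreedy : List Int → Int → Int → Int
  | [], _, kept => kept
  | c :: tl, budget, kept => if c ≤ budget then pvGreedy tl (budget - c) (kept - 1) else kept

def solution_alt (k : Int) (tangerine : List Int) : Int :=
  let counts := tangerine.foldl
    (fun d x => d.insert x (d.getD x 0 + 1)) (PySem.Dict.empty : PySem.Dict Int Int)
  pvGreedy (PySem.List.sorted counts.values (fun v => v))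
    ((tangerine.length : Int) - k) (counts.size : Int)

-- ===== PRECONDITION & SPEC =====
-- When k ≤ 0 and tangerine is nonempty with all elements equal, A returns 1 (its level loop
-- 'range(1, len(tangerine))' never reaches the single group of size len, so the group is never
-- removed) while B returns 0, the intended answer: a budget of len-k ≥ len may remove the group.
def D_solution (k : Int) (tangerine : List Int) : Prop :=
  k ≤ 0 ∧ tangerine ≠ [] ∧ ∀ x ∈ tangerine, x = tangerine.headI
instance (k : Int) (tangerine : List Int) : Decidable (D_solution k tangerine) := by
  unfold D_solution; infer_instance

def Spec_solution (k : Int) (tangerine : List Int) (out : Int) : Prop :=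
  ¬ D_solution k tangerine → out = solution_alt k tangerine
instance (k : Int) (tangerine : List Int) (out : Int) : Decidable (Spec_solution k tangerine out) := by
  unfold Spec_solution; infer_instance

def pvDiffWitness_solution : Int × List Int := (0, [5, 5])
def pvDiffWitnessOut_solution : Int × Int := (1, 0)

-- ===== CLAIM (what is proved, stated in full; the proofs are below) =====
def Claim_unchanged_solution : Prop := ∀ (k : Int) (tangerine : List Int), Dom_solution k tangerine → Spec_solution k tangerine (solution k tangerine)
def Claim_changed_solution : Prop := Dom_solution (pvDiffWitness_solution.1) (pvDiffWitness_solution.2) ∧ D_solution (pvDiffWitness_solution.1) (pvDiffWitness_solution.2) ∧ solution (pvDiffWitness_solution.1) (pvDiffWitness_solution.2) = pvDiffWitnessOut_solution.1 ∧ solution_alt (pvDiffWitness_solution.1) (pvDiffWitness_solution.2) = pvDiffWitnessOut_solution.2 ∧ pvDiffWitnessOut_solution.1 ≠ pvDiffWitnessOut_solution.2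
def Claim_exact_solution : Prop := ∀ (k : Int) (tangerine : List Int), Dom_solution k tangerine → D_solution k tangerine → solution k tangerine ≠ solution_alt k tangerine

-- ===== LEMMAS AND PROOFS =====

-- pure model of A's loops: the dict as its items list (keys stay fixed, only values change)
def pvInnerM (i : Int) : List (Int × Int) → Int → (List (Int × Int) × Int × Bool)
  | [], r => ([], r, true)
  | (j, v) :: tl, r =>
      let vr := if v = i then (if r ≥ i then (v - i, r - i) else (v - 0, (0 : Int))) else (v, r)
      if vr.2 = 0 then ((j, vr.1) :: tl, vr.2, false)
      else
        let res := pvInnerM i tl vr.2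
        ((j, vr.1) :: res.1, res.2)

def pvPass (st : List (Int × Int) × Int × Bool) (i : Int) : List (Int × Int) × Int × Bool :=
  if st.2.2 = false then st else pvInnerM i st.1 st.2.1

-- greedy consumption: how many of xs (in order) fit, and the remaining budget
def pvGp : Int → List Int → Nat × Int
  | r, [] => (0, r)
  | r, c :: tl => if c ≤ r then ((pvGp (r - c) tl).1 + 1, (pvGp (r - c) tl).2) else (0, r)

def pvCnt (ps : List (Int × Int)) : Nat := ps.countP (fun p => p.2 ≠ 0)
def pvZeroLe (i : Int) (ps : List (Int × Int)) : List (Int × Int) :=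
  ps.map (fun p => if p.2 ≤ i then (p.1, (0 : Int)) else p)
def pvZeroEq (i : Int) (ps : List (Int × Int)) : List (Int × Int) :=
  ps.map (fun p => if p.2 = i then (p.1, (0 : Int)) else p)

theorem pv_dict_build (t : List Int) :
    t.foldl (fun d x => if d.contains x then d.insert x (d.getD x 0 + 1) else d.insert x 1)
      (PySem.Dict.empty : PySem.Dict Int Int) = PySem.Dict.counter t := by
  rw [← PySem.Dict.foldl_insert_getD_add_one_eq_counter]
  congr 1
  funext d x
  by_cases h : d.contains x = true
  · simp [h]
  · have hf : d.contains x = false := by simpa using h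
    rw [if_neg (by simp [hf]), PySem.Dict.getD_of_not_contains d 0 hf]
    norm_num
theorem pvInnerM_fst (i : Int) (ps : List (Int × Int)) (r : Int) :
    (pvInnerM i ps r).1.map Prod.fst = ps.map Prod.fst := by
  induction ps generalizing r with
  | nil => rfl
  | cons p tl ih =>
    obtain ⟨j, v⟩ := p
    simp only [pvInnerM]
    split_ifs <;> simp [ih]
theorem pv_map_if_eq (j : Int) (w : Int) (l : List (Int × Int)) (h : ∀ p ∈ l, p.1 ≠ j) :
    l.map (fun p => if (p.1 == j) = true then (j, w) else p) = l := by
  induction l with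
  | nil => rfl
  | cons p tl ih =>
    rw [List.map_cons, if_neg (by simp [h p (by simp)]),
        ih (fun q hq => h q (by simp [hq]))]

theorem pv_insert_mid (pre tl : List (Int × Int)) (j v w : Int)
    (h : ((pre ++ (j, v) :: tl).map Prod.fst).Nodup) :
    (PySem.Dict.mk (pre ++ (j, v) :: tl)).insert j w = PySem.Dict.mk (pre ++ (j, w) :: tl) := by
  apply PySem.Dict.ext
  have hc : (PySem.Dict.mk (pre ++ (j, v) :: tl)).contains j = true := by
    rw [PySem.Dict.contains_iff_mem_keys, PySem.Dict.keys_mk]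
    simp
  rw [PySem.Dict.items_insert_of_contains _ w hc]
  simp only [List.map_append, List.map_cons] at h
  have hd := List.nodup_append.mp h
  have hj1 : j ∉ pre.map Prod.fst := fun hm => hd.2.2 j hm j (by simp) rfl
  have hj2 : j ∉ tl.map Prod.fst := (List.nodup_cons.mp hd.2.1).1
  have hpre : ∀ p ∈ pre, p.1 ≠ j := by
    intro p hp hne
    exact hj1 (by exact List.mem_map.mpr ⟨p, hp, hne⟩)
  have htl : ∀ p ∈ tl, p.1 ≠ j := by
    intro p hp hne
    exact hj2 (by exact List.mem_map.mpr ⟨p, hp, hne⟩)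
  show (pre ++ (j, v) :: tl).map (fun p => if (p.1 == j) = true then (j, w) else p) = _
  rw [List.map_append, List.map_cons, pv_map_if_eq j w pre hpre, pv_map_if_eq j w tl htl]
  simp

theorem pv_getD_mid (pre tl : List (Int × Int)) (j v : Int)
    (h : ((pre ++ (j, v) :: tl).map Prod.fst).Nodup) :
    (PySem.Dict.mk (pre ++ (j, v) :: tl)).getD j 0 = v := by
  apply PySem.Dict.getD_of_mem_items _ (by simp) _
  rw [PySem.Dict.keys_mk]; exact h

theorem pvInnerA_eq (i : Int) (suf pre : List (Int × Int)) (r : Int)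
    (h : ((pre ++ suf).map Prod.fst).Nodup) :
    pvInnerA i (suf.map Prod.fst) (PySem.Dict.mk (pre ++ suf)) r
      = (PySem.Dict.mk (pre ++ (pvInnerM i suf r).1), (pvInnerM i suf r).2.1, (pvInnerM i suf r).2.2) := by
  induction suf generalizing pre r with
  | nil => simp [pvInnerA, pvInnerM]
  | cons p tl ih =>
    obtain ⟨j, v⟩ := p
    have hget : (PySem.Dict.mk (pre ++ (j, v) :: tl)).getD j 0 = v := pv_getD_mid pre tl j v h
    simp only [List.map_cons, pvInnerA, pvInnerM, hget]
    by_cases h1 : v = i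
    · subst h1
      by_cases h2 : r ≥ v
      · by_cases h3 : r - v = 0
        · simp [h2, h3, sub_self, pv_insert_mid pre tl j v 0 h]
        · have h' : (((pre ++ [(j, 0)]) ++ tl).map Prod.fst).Nodup := by simpa using h
          have hih := ih (pre ++ [(j, 0)]) (r - v) h'
          simp only [List.append_assoc, List.singleton_append] at hih
          simp [h2, h3, sub_self, pv_insert_mid pre tl j v 0 h, hih]
      · simp [h2, pv_insert_mid pre tl j v v h]
    · by_cases h3 : r = 0
      · simp [h1, h3]
      · have h' : (((pre ++ [(j, v)]) ++ tl).map Prod.fst).Nodup := by simpa using h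
        have hih := ih (pre ++ [(j, v)]) r h'
        simp only [List.append_assoc, List.singleton_append] at hih
        simp [h1, h3, hih]
theorem pv_outer_eq (l : List Int) (ps : List (Int × Int)) (r : Int) (flag : Bool)
    (h : (ps.map Prod.fst).Nodup) :
    l.foldl (fun (st : PySem.Dict Int Int × Int × Bool) i =>
        if st.2.2 = false then st else pvInnerA i st.1.keys st.1 st.2.1)
      (PySem.Dict.mk ps, r, flag)
      = (PySem.Dict.mk (l.foldl pvPass (ps, r, flag)).1,
         (l.foldl pvPass (ps, r, flag)).2.1, (l.foldl pvPass (ps, r, flag)).2.2) := by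
  induction l generalizing ps r flag with
  | nil => rfl
  | cons i tl ih =>
    simp only [List.foldl_cons]
    by_cases hf : flag = false
    · rw [if_pos (by simpa using hf)]
      rw [show pvPass (ps, r, flag) i = (ps, r, flag) by simp [pvPass, hf]]
      exact ih ps r flag h
    · rw [if_neg (by simpa using hf)]
      have hb : flag = true := by cases flag <;> simp_all
      rw [show (PySem.Dict.mk ps).keys = ps.map Prod.fst from PySem.Dict.keys_mk ps]
      have := pvInnerA_eq i ps [] r (by simpa using h)
      simp only [List.nil_append] at this
      rw [this]
      rw [show pvPass (ps, r, flag) i = pvInnerM i ps r by simp [pvPass, hb]]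
      have h2 : ((pvInnerM i ps r).1.map Prod.fst).Nodup := by rw [pvInnerM_fst]; exact h
      have := ih (pvInnerM i ps r).1 (pvInnerM i ps r).2.1 (pvInnerM i ps r).2.2 h2
      rw [this]
theorem pv_answer_eq (ps : List (Int × Int)) (h : (ps.map Prod.fst).Nodup) :
    (PySem.Dict.mk ps).keys.foldl
      (fun a key => if (PySem.Dict.mk ps).getD key 0 ≠ 0 then a + 1 else a) 0
      = (pvCnt ps : Int) := by
  rw [show (PySem.Dict.mk ps).keys = ps.map Prod.fst from PySem.Dict.keys_mk ps]
  have key : ∀ p ∈ ps, (PySem.Dict.mk ps).getD p.1 0 = p.2 := by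
    intro p hp
    apply PySem.Dict.getD_of_mem_items _ (by simpa using hp)
    rw [PySem.Dict.keys_mk]; exact h
  have e : ∀ (l : List (Int × Int)) (a : Int), (∀ p ∈ l, p ∈ ps) →
      (l.map Prod.fst).foldl (fun a key => if (PySem.Dict.mk ps).getD key 0 ≠ 0 then a + 1 else a) a
        = a + (l.countP (fun p => p.2 ≠ 0) : Int) := by
    intro l
    induction l with
    | nil => intro a _; simp
    | cons p tl ih =>
      intro a hmem
      simp only [List.map_cons, List.foldl_cons, List.countP_cons]
      rw [key p (hmem p (by simp))]
      by_cases hz : p.2 ≠ 0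
      · rw [if_pos hz, ih (a + 1) (fun q hq => hmem q (by simp [hq]))]
        simp [hz]
        push_cast
        ring
      · rw [if_neg hz, ih a (fun q hq => hmem q (by simp [hq]))]
        simp only [ne_eq, decide_not]
        simp at hz
        simp [hz]
  have := e ps 0 (fun p hp => hp)
  rw [this]
  simp [pvCnt]
theorem pvGreedy_eq_gp (xs : List Int) (b kept : Int) :
    pvGreedy xs b kept = kept - ((pvGp b xs).1 : Int) := by
  induction xs generalizing b kept with
  | nil => simp [pvGreedy, pvGp]
  | cons c tl ih =>
    simp only [pvGreedy, pvGp]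
    split
    · rw [ih]; push_cast; ring
    · simp
theorem pvGp_append (r : Int) (xs ys : List Int) :
    pvGp r (xs ++ ys)
      = if (pvGp r xs).1 = xs.length
        then ((pvGp r xs).1 + (pvGp (pvGp r xs).2 ys).1, (pvGp (pvGp r xs).2 ys).2)
        else pvGp r xs := by
  induction xs generalizing r with
  | nil => simp [pvGp]
  | cons c tl ih =>
    by_cases hc : c ≤ r
    · simp only [List.cons_append, pvGp, hc, if_true, List.length_cons]
      rw [ih (r - c)]
      by_cases hlen : (pvGp (r - c) tl).1 = tl.length
      · rw [if_pos hlen, if_pos (by omega)]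
        simp only [Prod.mk.injEq]
        exact ⟨by omega, trivial⟩
      · rw [if_neg hlen, if_neg (by omega)]
    · simp only [List.cons_append, pvGp, hc, if_false, List.length_cons]
      rw [if_neg (by omega)]
theorem pvGp_append_full (r : Int) (xs ys : List Int) (r' : Int)
    (h : pvGp r xs = (xs.length, r')) :
    pvGp r (xs ++ ys) = (xs.length + (pvGp r' ys).1, (pvGp r' ys).2) := by
  rw [pvGp_append, h]
  simp

theorem pvGp_append_stuck (r : Int) (xs ys : List Int)
    (h : (pvGp r xs).1 ≠ xs.length) :
    pvGp r (xs ++ ys) = pvGp r xs := by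
  rw [pvGp_append, if_neg h]

theorem pvGp_stop (r : Int) (ys : List Int) (h : ∀ c ∈ ys, ¬ c ≤ r) : pvGp r ys = (0, r) := by
  cases ys with
  | nil => rfl
  | cons c tl => simp [pvGp, h c (by simp)]
theorem pvGp_total (r : Int) (xs : List Int) (h : (pvGp r xs).1 = xs.length) :
    (pvGp r xs).2 = r - xs.sum := by
  induction xs generalizing r with
  | nil => simp [pvGp]
  | cons c tl ih =>
    simp only [pvGp, List.length_cons] at h ⊢
    split at h
    · simp only at h ⊢
      rw [if_pos (by assumption)]
      simp only [List.sum_cons]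
      rw [ih (r - c) (by omega)]
      ring
    · simp at h
theorem pv_sorted_filter_le_eq (s : List Int) (hs : s.Pairwise (· ≤ ·)) (j : Int) :
    s.filter (fun v => decide (v ≤ j)) ++ s.filter (fun v => decide (v = j + 1))
      = s.filter (fun v => decide (v ≤ j + 1)) := by
  induction s with
  | nil => rfl
  | cons x tl ih =>
    have hx := List.pairwise_cons.mp hs
    have IH := ih hx.2
    by_cases h1 : x ≤ j
    · rw [List.filter_cons_of_pos (by simpa using h1),
          List.filter_cons_of_neg (by simp; omega),
          List.filter_cons_of_pos (by simp; omega), List.cons_append, IH]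
    · by_cases h2 : x = j + 1
      · have h3 : tl.filter (fun v => decide (v ≤ j)) = [] :=
          List.filter_eq_nil_iff.mpr (fun y hy => by have := hx.1 y hy; simp; omega)
        rw [List.filter_cons_of_neg (by simpa using h1),
            List.filter_cons_of_pos (by simpa using h2),
            List.filter_cons_of_pos (by simp; omega), h3, List.nil_append,
            ← IH, h3, List.nil_append]
      · rw [List.filter_cons_of_neg (by simpa using h1),
            List.filter_cons_of_neg (by simpa using h2),
            List.filter_cons_of_neg (by simp; omega), IH]
theorem pv_sorted_filter_split (s : List Int) (hs : s.Pairwise (· ≤ ·)) (j : Int) :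
    s.filter (fun v => decide (v ≤ j)) ++ s.filter (fun v => decide (j < v)) = s := by
  induction s with
  | nil => rfl
  | cons x tl ih =>
    have hx := List.pairwise_cons.mp hs
    have IH := ih hx.2
    by_cases h1 : x ≤ j
    · rw [List.filter_cons_of_pos (by simpa using h1),
          List.filter_cons_of_neg (by simp; omega), List.cons_append, IH]
    · have h3 : tl.filter (fun v => decide (v ≤ j)) = [] :=
        List.filter_eq_nil_iff.mpr (fun y hy => by have := hx.1 y hy; simp; omega)
      have h4 : tl.filter (fun v => decide (j < v)) = tl :=
        List.filter_eq_self.mpr (fun y hy => by have := hx.1 y hy; simp; omega)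
      rw [List.filter_cons_of_neg (by simpa using h1),
          List.filter_cons_of_pos (by simp; omega), h3, h4, List.nil_append]
theorem pv_inner_level (i : Int) (ps : List (Int × Int)) (r : Int)
    (hi : 1 ≤ i) (hr : r ≠ 0) (hv : ∀ p ∈ ps, p.2 = 0 ∨ i ≤ p.2) :
    ((pvInnerM i ps r).2.2 = true →
        (pvInnerM i ps r).1 = pvZeroEq i ps
        ∧ (pvInnerM i ps r).2.1 = (pvGp r ((ps.map Prod.snd).filter (fun v => decide (v = i)))).2
        ∧ (pvGp r ((ps.map Prod.snd).filter (fun v => decide (v = i)))).2 ≠ 0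
        ∧ (pvGp r ((ps.map Prod.snd).filter (fun v => decide (v = i)))).1
            = ((ps.map Prod.snd).filter (fun v => decide (v = i))).length)
    ∧ ((pvInnerM i ps r).2.2 = false →
        pvCnt (pvInnerM i ps r).1 + (pvGp r ((ps.map Prod.snd).filter (fun v => decide (v = i)))).1 = pvCnt ps
        ∧ ((pvGp r ((ps.map Prod.snd).filter (fun v => decide (v = i)))).2 = 0
           ∨ ((pvGp r ((ps.map Prod.snd).filter (fun v => decide (v = i)))).1
                < ((ps.map Prod.snd).filter (fun v => decide (v = i))).length
              ∧ (pvGp r ((ps.map Prod.snd).filter (fun v => decide (v = i)))).2 < i))) := by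
  induction ps generalizing r with
  | nil =>
    constructor
    · intro _
      simp [pvInnerM, pvZeroEq, pvGp, hr]
    · intro hfalse
      simp [pvInnerM] at hfalse
  | cons p tl ih =>
    obtain ⟨j, v⟩ := p
    have hvtl : ∀ p ∈ tl, p.2 = 0 ∨ i ≤ p.2 := fun q hq => hv q (by simp [hq])
    have hvh := hv (j, v) (by simp)
    simp only at hvh
    by_cases h1 : v = i
    · subst h1
      -- head matches: fi = v :: fi_tl
      have hfi : ((((j, v) :: tl).map Prod.snd).filter (fun w => decide (w = v)))
          = v :: ((tl.map Prod.snd).filter (fun w => decide (w = v))) := by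
        simp [List.filter_cons]
      by_cases h2 : r ≥ v
      · by_cases h3 : r - v = 0
        · -- removal exhausts the budget: stop, gp consumed head then nothing
          have hgtl : pvGp (r - v) ((tl.map Prod.snd).filter (fun w => decide (w = v))) = (0, r - v) := by
            apply pvGp_stop
            intro c hc
            simp only [List.mem_filter, decide_eq_true_eq] at hc
            omega
          constructor
          · intro htrue
            simp [pvInnerM, h2, h3] at htrue
          · intro _
            rw [hfi]
            simp only [pvInnerM, if_pos rfl, ge_iff_le, h2, if_pos, h3, if_pos rfl]
            simp only [pvGp, if_pos h2, hgtl]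
            constructor
            · simp [pvCnt, List.countP_cons, sub_self, show (v:Int) ≠ 0 from by omega]
            · left; omega
        · -- head removed, continue into the tail
          have IH := ih (r - v) h3 hvtl
          have hred : pvInnerM v ((j, v) :: tl) r
              = ((j, v - v) :: (pvInnerM v tl (r - v)).1, (pvInnerM v tl (r - v)).2) := by
            simp [pvInnerM, h2, h3]
          have hgp : pvGp r (v :: ((tl.map Prod.snd).filter (fun w => decide (w = v))))
              = ((pvGp (r - v) ((tl.map Prod.snd).filter (fun w => decide (w = v)))).1 + 1,
                 (pvGp (r - v) ((tl.map Prod.snd).filter (fun w => decide (w = v)))).2) := by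
            simp [pvGp, h2]
          rw [hfi, hred, hgp]
          constructor
          · intro htrue
            obtain ⟨e1, e2, e3, e4⟩ := IH.1 htrue
            refine ⟨?_, ?_, ?_, ?_⟩
            · show (j, v - v) :: (pvInnerM v tl (r - v)).1 = pvZeroEq v ((j, v) :: tl)
              rw [e1]; simp [pvZeroEq, sub_self]
            · simpa using e2
            · simpa using e3
            · simp [e4]
          · intro hfalse
            obtain ⟨e1, e2⟩ := IH.2 hfalse
            constructor
            · have hvne : (v:Int) ≠ 0 := by omega
              simp only [pvCnt, List.countP_cons, ne_eq, decide_not] at e1 ⊢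
              simp [sub_self, hvne]
              omega
            · rcases e2 with e2 | ⟨e2a, e2b⟩
              · left; simpa using e2
              · right
                refine ⟨by simp; omega, by simpa using e2b⟩
      · -- r < i: freeze without removing, remove_num := 0
        have hgp : pvGp r (v :: ((tl.map Prod.snd).filter (fun w => decide (w = v)))) = (0, r) := by
          simp [pvGp, h2]
        constructor
        · intro htrue
          simp [pvInnerM, h2, hr] at htrue
        · intro _
          rw [hfi, hgp]
          constructor
          · simp [pvInnerM, h2, pvCnt, List.countP_cons]
          · right
            refine ⟨by simp, by omega⟩
    · -- head does not match: pass through (r ≠ 0)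
      have IH := ih r hr hvtl
      have hfi : ((((j, v) :: tl).map Prod.snd).filter (fun w => decide (w = i)))
          = ((tl.map Prod.snd).filter (fun w => decide (w = i))) := by
        simp [h1]
      have hred : pvInnerM i ((j, v) :: tl) r
          = ((j, v) :: (pvInnerM i tl r).1, (pvInnerM i tl r).2) := by
        simp [pvInnerM, h1, hr]
      rw [hfi, hred]
      constructor
      · intro htrue
        obtain ⟨e1, e2, e3, e4⟩ := IH.1 htrue
        exact ⟨by rw [show ((j, v) :: (pvInnerM i tl r).1, (pvInnerM i tl r).2).1
            = (j, v) :: (pvInnerM i tl r).1 from rfl, e1]; simp [pvZeroEq, h1], e2, e3, e4⟩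
      · intro hfalse
        obtain ⟨e1, e2⟩ := IH.2 hfalse
        refine ⟨?_, e2⟩
        simp only [pvCnt, List.countP_cons] at e1 ⊢
        omega
theorem pv_zeroEq_zeroLe (i : Int) (hi : 0 ≤ i) (ps : List (Int × Int))
    (h1 : ∀ p ∈ ps, 1 ≤ p.2) :
    pvZeroEq (i + 1) (pvZeroLe i ps) = pvZeroLe (i + 1) ps := by
  unfold pvZeroEq pvZeroLe
  rw [List.map_map]
  apply List.map_congr_left
  intro p hp
  have h2 := h1 p hp
  by_cases hle : p.2 ≤ i
  · simp only [Function.comp_apply, if_pos hle]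
    rw [if_neg (by omega), if_pos (by omega)]
  · simp only [Function.comp_apply, if_neg hle]
    by_cases he : p.2 = i + 1
    · rw [if_pos he, if_pos (by omega)]
    · rw [if_neg he, if_neg (by omega)]
theorem pv_zeroLe_snd_filter (i c : Int) (hi : 0 ≤ i) (hc : i < c) (ps : List (Int × Int)) :
    ((pvZeroLe i ps).map Prod.snd).filter (fun v => decide (v = c))
      = (ps.map Prod.snd).filter (fun v => decide (v = c)) := by
  unfold pvZeroLe
  rw [List.map_map]
  induction ps with
  | nil => rfl
  | cons p tl ih =>
    simp only [List.map_cons, Function.comp_apply]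
    by_cases hle : p.2 ≤ i
    · rw [if_pos hle]
      simp only
      rw [List.filter_cons_of_neg (by simp; omega), ih,
          List.filter_cons_of_neg (by simp; omega)]
    · rw [if_neg hle]
      by_cases he : p.2 = c
      · rw [List.filter_cons_of_pos (by simpa using he), ih,
            List.filter_cons_of_pos (by simpa using he)]
      · rw [List.filter_cons_of_neg (by simpa using he), ih,
            List.filter_cons_of_neg (by simpa using he)]
theorem pv_filter_eq_of_perm (s l : List Int) (h : s.Perm l) (c : Int) :
    s.filter (fun v => decide (v = c)) = l.filter (fun v => decide (v = c)) := by
  have e : ∀ (m : List Int), m.filter (fun v => decide (v = c)) = m.filter (fun x => x == c) := by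
    intro m; apply List.filter_congr; intro x _; exact Eq.symm (Bool.beq_eq_decide_eq x c)
  rw [e, e, List.filter_beq c, List.filter_beq c, h.count_eq]
theorem pv_cnt_zeroLe (c : Int) (ps : List (Int × Int)) (h1 : ∀ p ∈ ps, 1 ≤ p.2)
    (s : List Int) (hp : s.Perm (ps.map Prod.snd)) :
    pvCnt (pvZeroLe c ps) + (s.filter (fun v => decide (v ≤ c))).length = ps.length := by
  unfold pvCnt pvZeroLe
  rw [List.countP_map, ← List.countP_eq_length_filter, hp.countP_eq, List.countP_map]
  have e1 : ps.countP ((fun p => decide (p.2 ≠ 0)) ∘ fun p => if p.2 ≤ c then (p.1, (0:Int)) else p)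
      = ps.countP (fun p => !(decide (p.2 ≤ c))) := by
    apply List.countP_congr
    intro p hp'
    have h2 := h1 p hp'
    by_cases hle : p.2 ≤ c
    · simp [hle]
    · simp [hle]; omega
  have e2 : ps.countP ((fun v => decide (v ≤ c)) ∘ Prod.snd)
      = ps.countP (fun p => decide (p.2 ≤ c)) := rfl
  rw [e1, e2]
  have := (List.length_eq_length_filter_add (l := ps) (fun p => decide (p.2 ≤ c))).symm
  rw [List.countP_eq_length_filter, List.countP_eq_length_filter]
  omega
theorem pv_invariant (m : Nat) (ps0 : List (Int × Int)) (r0 : Int)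
    (h1 : ∀ p ∈ ps0, 1 ≤ p.2) (hr : r0 ≠ 0) :
    (((PySem.List.pyRange 1 ((m : Int) + 1)).foldl pvPass (ps0, r0, true))
        = (pvZeroLe (m : Int) ps0,
           r0 - ((PySem.List.sorted (ps0.map Prod.snd) (fun v => v)).filter (fun v => decide (v ≤ (m : Int)))).sum, true)
      ∧ r0 - ((PySem.List.sorted (ps0.map Prod.snd) (fun v => v)).filter (fun v => decide (v ≤ (m : Int)))).sum ≠ 0
      ∧ pvGp r0 ((PySem.List.sorted (ps0.map Prod.snd) (fun v => v)).filter (fun v => decide (v ≤ (m : Int))))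
          = (((PySem.List.sorted (ps0.map Prod.snd) (fun v => v)).filter (fun v => decide (v ≤ (m : Int)))).length,
             r0 - ((PySem.List.sorted (ps0.map Prod.snd) (fun v => v)).filter (fun v => decide (v ≤ (m : Int)))).sum))
    ∨ (((PySem.List.pyRange 1 ((m : Int) + 1)).foldl pvPass (ps0, r0, true)).2.2 = false
      ∧ pvCnt ((PySem.List.pyRange 1 ((m : Int) + 1)).foldl pvPass (ps0, r0, true)).1
          + (pvGp r0 (PySem.List.sorted (ps0.map Prod.snd) (fun v => v))).1 = ps0.length) := by
  have hs : (PySem.List.sorted (ps0.map Prod.snd) (fun v => v)).Pairwise (· ≤ ·) :=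
    PySem.List.sorted_pairwise (ps0.map Prod.snd) (fun v => v)
  have hperm : (PySem.List.sorted (ps0.map Prod.snd) (fun v => v)).Perm (ps0.map Prod.snd) :=
    PySem.List.sorted_perm (ps0.map Prod.snd) (fun v => v) false
  have hpos : ∀ c ∈ PySem.List.sorted (ps0.map Prod.snd) (fun v => v), 1 ≤ c := by
    intro c hc
    have := hperm.mem_iff.mp hc
    obtain ⟨p, hp, rfl⟩ := List.mem_map.mp this
    exact h1 p hp
  induction m with
  | zero =>
    left
    have hz : pvZeroLe (0 : Int) ps0 = ps0 := by
      unfold pvZeroLe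
      have he : ∀ p ∈ ps0, (if p.2 ≤ (0 : Int) then (p.1, (0 : Int)) else p) = id p := by
        intro p hp
        rw [if_neg (by have := h1 p hp; omega)]
        rfl
      rw [List.map_congr_left he, List.map_id]
    have hf : (PySem.List.sorted (ps0.map Prod.snd) (fun v => v)).filter (fun v => decide (v ≤ ((0:Nat) : Int))) = [] :=
      List.filter_eq_nil_iff.mpr (fun c hc => by have := hpos c hc; simp; omega)
    rw [show (((0:Nat) : Int) + 1) = 1 by norm_num]
    rw [show PySem.List.pyRange 1 1 = [] from rfl]
    rw [hf]
    simp only [List.foldl_nil, List.sum_nil, List.length_nil, sub_zero]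
    refine ⟨by rw [Nat.cast_zero, hz], hr, by simp [pvGp]⟩
  | succ m ih =>
    have hrange : PySem.List.pyRange 1 (((m+1 : Nat) : Int) + 1)
        = PySem.List.pyRange 1 ((m : Int) + 1) ++ [(m : Int) + 1] := by
      rw [show (((m+1 : Nat) : Int) + 1) = ((m : Int) + 1) + 1 by push_cast; ring]
      exact PySem.List.pyRange_one_succ_right (by omega)
    rw [hrange, List.foldl_append, List.foldl_cons, List.foldl_nil]
    rcases ih with ⟨ha1, ha2, ha3⟩ | ⟨hb1, hb2⟩
    · -- was still running: one more level
      rw [ha1]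
      have hpass : pvPass (pvZeroLe (m : Int) ps0,
          r0 - ((PySem.List.sorted (ps0.map Prod.snd) (fun v => v)).filter (fun v => decide (v ≤ (m : Int)))).sum, true) ((m : Int) + 1)
          = pvInnerM ((m : Int) + 1) (pvZeroLe (m : Int) ps0)
              (r0 - ((PySem.List.sorted (ps0.map Prod.snd) (fun v => v)).filter (fun v => decide (v ≤ (m : Int)))).sum) := rfl
      rw [hpass]
      have hv : ∀ p ∈ pvZeroLe (m : Int) ps0, p.2 = 0 ∨ ((m : Int) + 1) ≤ p.2 := by
        intro p hp
        obtain ⟨q, hq, rfl⟩ := List.mem_map.mp hp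
        by_cases hle : q.2 ≤ (m : Int)
        · left; simp [hle]
        · right; simp [hle]; omega
      have IL := pv_inner_level ((m : Int) + 1) (pvZeroLe (m : Int) ps0)
          (r0 - ((PySem.List.sorted (ps0.map Prod.snd) (fun v => v)).filter (fun v => decide (v ≤ (m : Int)))).sum)
          (by omega) ha2 hv
      have hfi : (((pvZeroLe (m : Int) ps0).map Prod.snd).filter (fun v => decide (v = (m : Int) + 1)))
          = (PySem.List.sorted (ps0.map Prod.snd) (fun v => v)).filter (fun v => decide (v = (m : Int) + 1)) := by
        rw [pv_zeroLe_snd_filter (m : Int) ((m : Int) + 1) (by omega) (by omega) ps0]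
        exact (pv_filter_eq_of_perm _ _ hperm ((m : Int) + 1)).symm
      have hdecomp := pv_sorted_filter_le_eq (PySem.List.sorted (ps0.map Prod.snd) (fun v => v)) hs (m : Int)
      rw [hfi] at IL
      cases hflag : (pvInnerM ((m : Int) + 1) (pvZeroLe (m : Int) ps0)
          (r0 - ((PySem.List.sorted (ps0.map Prod.snd) (fun v => v)).filter (fun v => decide (v ≤ (m : Int)))).sum)).2.2 with
      | true =>
        obtain ⟨e1, e2, e3, e4⟩ := IL.1 hflag
        left
        have hcast : ((m + 1 : Nat) : Int) = (m : Int) + 1 := by push_cast; ring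
        have hsum : ((PySem.List.sorted (ps0.map Prod.snd) (fun v => v)).filter (fun v => decide (v ≤ (m : Int) + 1))).sum
            = ((PySem.List.sorted (ps0.map Prod.snd) (fun v => v)).filter (fun v => decide (v ≤ (m : Int)))).sum
              + ((PySem.List.sorted (ps0.map Prod.snd) (fun v => v)).filter (fun v => decide (v = (m : Int) + 1))).sum := by
          rw [← hdecomp, List.sum_append]
        have hlen : ((PySem.List.sorted (ps0.map Prod.snd) (fun v => v)).filter (fun v => decide (v ≤ (m : Int) + 1))).length
            = ((PySem.List.sorted (ps0.map Prod.snd) (fun v => v)).filter (fun v => decide (v ≤ (m : Int)))).length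
              + ((PySem.List.sorted (ps0.map Prod.snd) (fun v => v)).filter (fun v => decide (v = (m : Int) + 1))).length := by
          rw [← hdecomp, List.length_append]
        have hg2 : (pvGp (r0 - ((PySem.List.sorted (ps0.map Prod.snd) (fun v => v)).filter (fun v => decide (v ≤ (m : Int)))).sum)
              ((PySem.List.sorted (ps0.map Prod.snd) (fun v => v)).filter (fun v => decide (v = (m : Int) + 1)))).2
            = r0 - ((PySem.List.sorted (ps0.map Prod.snd) (fun v => v)).filter (fun v => decide (v ≤ (m : Int) + 1))).sum := by
          rw [pvGp_total _ _ e4, hsum]; ring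
        have hgnew : pvGp r0 ((PySem.List.sorted (ps0.map Prod.snd) (fun v => v)).filter (fun v => decide (v ≤ (m : Int) + 1)))
            = (((PySem.List.sorted (ps0.map Prod.snd) (fun v => v)).filter (fun v => decide (v ≤ (m : Int) + 1))).length,
               r0 - ((PySem.List.sorted (ps0.map Prod.snd) (fun v => v)).filter (fun v => decide (v ≤ (m : Int) + 1))).sum) := by
          rw [← hdecomp, pvGp_append_full r0 _ _ _ ha3, List.length_append, List.sum_append]
          simp only [Prod.mk.injEq]
          constructor
          · rw [e4]
          · rw [pvGp_total _ _ e4]; ring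
        refine ⟨?_, ?_, ?_⟩
        · rw [hcast]
          have hzz := pv_zeroEq_zeroLe (m : Int) (by omega) ps0 h1
          apply Prod.ext
          · show (pvInnerM ((m : Int) + 1) (pvZeroLe (m : Int) ps0) _).1 = _
            rw [e1, hzz]
          · apply Prod.ext
            · show (pvInnerM ((m : Int) + 1) (pvZeroLe (m : Int) ps0) _).2.1 = _
              rw [e2, hg2]
            · exact hflag
        · rw [hcast, ← hg2]; exact e3
        · rw [hcast]; exact hgnew
      | false =>
        obtain ⟨e1, e2⟩ := IL.2 hflag
        right
        have hcast : ((m + 1 : Nat) : Int) = (m : Int) + 1 := by push_cast; ring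
        have hsplit := pv_sorted_filter_split (PySem.List.sorted (ps0.map Prod.snd) (fun v => v)) hs ((m : Int) + 1)
        -- s = sLe m ++ (s= ++ sGt)
        have hS : PySem.List.sorted (ps0.map Prod.snd) (fun v => v)
            = ((PySem.List.sorted (ps0.map Prod.snd) (fun v => v)).filter (fun v => decide (v ≤ (m : Int))))
              ++ (((PySem.List.sorted (ps0.map Prod.snd) (fun v => v)).filter (fun v => decide (v = (m : Int) + 1)))
                  ++ ((PySem.List.sorted (ps0.map Prod.snd) (fun v => v)).filter (fun v => decide ((m : Int) + 1 < v)))) := by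
          rw [← List.append_assoc, hdecomp, hsplit]
        have hstop0 : ∀ (b : Int), b ≤ 0 →
            pvGp b ((PySem.List.sorted (ps0.map Prod.snd) (fun v => v)).filter (fun v => decide ((m : Int) + 1 < v))) = (0, b) := by
          intro b hb
          apply pvGp_stop
          intro c hc
          have := (List.mem_filter.mp hc).1
          have := hpos c (List.mem_filter.mp hc).1
          omega
        have hcount : (pvGp r0 (PySem.List.sorted (ps0.map Prod.snd) (fun v => v))).1
            = ((PySem.List.sorted (ps0.map Prod.snd) (fun v => v)).filter (fun v => decide (v ≤ (m : Int)))).length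
              + (pvGp (r0 - ((PySem.List.sorted (ps0.map Prod.snd) (fun v => v)).filter (fun v => decide (v ≤ (m : Int)))).sum)
                  ((PySem.List.sorted (ps0.map Prod.snd) (fun v => v)).filter (fun v => decide (v = (m : Int) + 1)))).1 := by
          conv_lhs => rw [hS]
          rw [pvGp_append_full r0 _ _ _ ha3]
          have htail : (pvGp (r0 - ((PySem.List.sorted (ps0.map Prod.snd) (fun v => v)).filter (fun v => decide (v ≤ (m : Int)))).sum)
                (((PySem.List.sorted (ps0.map Prod.snd) (fun v => v)).filter (fun v => decide (v = (m : Int) + 1)))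
                  ++ ((PySem.List.sorted (ps0.map Prod.snd) (fun v => v)).filter (fun v => decide ((m : Int) + 1 < v))))).1
              = (pvGp (r0 - ((PySem.List.sorted (ps0.map Prod.snd) (fun v => v)).filter (fun v => decide (v ≤ (m : Int)))).sum)
                  ((PySem.List.sorted (ps0.map Prod.snd) (fun v => v)).filter (fun v => decide (v = (m : Int) + 1)))).1 := by
            rcases e2 with hz | ⟨hlt, _⟩
            · by_cases hfull : (pvGp (r0 - ((PySem.List.sorted (ps0.map Prod.snd) (fun v => v)).filter (fun v => decide (v ≤ (m : Int)))).sum)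
                  ((PySem.List.sorted (ps0.map Prod.snd) (fun v => v)).filter (fun v => decide (v = (m : Int) + 1)))).1
                  = ((PySem.List.sorted (ps0.map Prod.snd) (fun v => v)).filter (fun v => decide (v = (m : Int) + 1))).length
              · rw [pvGp_append, if_pos hfull, hz, hstop0 0 (by norm_num)]
                simp
              · rw [pvGp_append_stuck _ _ _ hfull]
            · rw [pvGp_append_stuck _ _ _ (by omega)]
          rw [htail]
        have hcnt := pv_cnt_zeroLe (m : Int) ps0 h1 _ (by exact hperm)
        refine ⟨rfl, ?_⟩
        rw [hcount]
        omega
    · -- already frozen: the pass is the identity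
      have hpass : pvPass ((PySem.List.pyRange 1 ((m : Int) + 1)).foldl pvPass (ps0, r0, true)) ((m : Int) + 1)
          = (PySem.List.pyRange 1 ((m : Int) + 1)).foldl pvPass (ps0, r0, true) := by
        simp [pvPass, hb1]
      rw [show (((m+1 : Nat) : Int)) = (m : Int) + 1 by push_cast; ring, hpass]
      right
      exact ⟨hb1, hb2⟩

theorem pv_main (m : Nat) (ps0 : List (Int × Int)) (r0 : Int)
    (h1 : ∀ p ∈ ps0, 1 ≤ p.2) (hr : r0 ≠ 0)
    (h2 : ∀ p ∈ ps0, p.2 ≤ (m : Int) ∨ r0 < p.2) :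
    pvCnt ((PySem.List.pyRange 1 ((m : Int) + 1)).foldl pvPass (ps0, r0, true)).1
      + (pvGp r0 (PySem.List.sorted (ps0.map Prod.snd) (fun v => v))).1 = ps0.length := by
  have hs : (PySem.List.sorted (ps0.map Prod.snd) (fun v => v)).Pairwise (· ≤ ·) :=
    PySem.List.sorted_pairwise (ps0.map Prod.snd) (fun v => v)
  have hperm : (PySem.List.sorted (ps0.map Prod.snd) (fun v => v)).Perm (ps0.map Prod.snd) :=
    PySem.List.sorted_perm (ps0.map Prod.snd) (fun v => v) false
  have hpos : ∀ c ∈ PySem.List.sorted (ps0.map Prod.snd) (fun v => v), 1 ≤ c := by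
    intro c hc
    obtain ⟨p, hp, rfl⟩ := List.mem_map.mp (hperm.mem_iff.mp hc)
    exact h1 p hp
  rcases pv_invariant m ps0 r0 h1 hr with ⟨ha1, ha2, ha3⟩ | ⟨hb1, hb2⟩
  · rw [ha1]
    have hsplit := pv_sorted_filter_split (PySem.List.sorted (ps0.map Prod.snd) (fun v => v)) hs (m : Int)
    have hSm : (0 : Int) ≤ ((PySem.List.sorted (ps0.map Prod.snd) (fun v => v)).filter (fun v => decide (v ≤ (m : Int)))).sum :=
      List.sum_nonneg (fun x hx => by have := hpos x (List.mem_filter.mp hx).1; omega)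
    have hstop : pvGp (r0 - ((PySem.List.sorted (ps0.map Prod.snd) (fun v => v)).filter (fun v => decide (v ≤ (m : Int)))).sum)
        ((PySem.List.sorted (ps0.map Prod.snd) (fun v => v)).filter (fun v => decide ((m : Int) < v)))
        = (0, r0 - ((PySem.List.sorted (ps0.map Prod.snd) (fun v => v)).filter (fun v => decide (v ≤ (m : Int)))).sum) := by
      apply pvGp_stop
      intro c hc
      have hcm : ((m : Int)) < c := by simpa using (List.mem_filter.mp hc).2
      have hcs : c ∈ PySem.List.sorted (ps0.map Prod.snd) (fun v => v) := (List.mem_filter.mp hc).1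
      obtain ⟨p, hp, rfl⟩ := List.mem_map.mp (hperm.mem_iff.mp hcs)
      rcases h2 p hp with hle | hgt
      · omega
      · omega
    have hgp : (pvGp r0 (PySem.List.sorted (ps0.map Prod.snd) (fun v => v))).1
        = ((PySem.List.sorted (ps0.map Prod.snd) (fun v => v)).filter (fun v => decide (v ≤ (m : Int)))).length := by
      conv_lhs => rw [← hsplit]
      rw [pvGp_append_full r0 _ _ _ ha3, hstop]
      simp
    have hcnt := pv_cnt_zeroLe (m : Int) ps0 h1 _ hperm
    rw [hgp]
    omega
  · exact hb2

-- when the budget is already 0 the very first pass freezes everything untouched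
theorem pvInnerM_zero (i : Int) (hi : 1 ≤ i) (ps : List (Int × Int)) :
    pvInnerM i ps 0 = (ps, 0, ps.isEmpty) := by
  cases ps with
  | nil => rfl
  | cons p tl =>
    obtain ⟨j, v⟩ := p
    by_cases h1 : v = i
    · simp [pvInnerM, h1, show ¬ ((0:Int) ≥ i) by omega]
    · simp [pvInnerM, h1]

theorem pv_fold_zero (l : List Int) (ps : List (Int × Int)) (flag : Bool)
    (hl : ∀ i ∈ l, 1 ≤ i) :
    (l.foldl pvPass (ps, 0, flag)).1 = ps ∧ (l.foldl pvPass (ps, 0, flag)).2.1 = 0 := by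
  induction l generalizing flag with
  | nil => exact ⟨rfl, rfl⟩
  | cons i tl ih =>
    rw [List.foldl_cons]
    cases flag with
    | false =>
      rw [show pvPass (ps, 0, false) i = (ps, 0, false) from rfl]
      exact ih false (fun x hx => hl x (by simp [hx]))
    | true =>
      rw [show pvPass (ps, 0, true) i = pvInnerM i ps 0 from rfl,
          pvInnerM_zero i (hl i (by simp)) ps]
      exact ih ps.isEmpty (fun x hx => hl x (by simp [hx]))

theorem pv_fold_fst (l : List Int) (ps : List (Int × Int)) (r : Int) (flag : Bool) :
    (l.foldl pvPass (ps, r, flag)).1.map Prod.fst = ps.map Prod.fst := by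
  induction l generalizing ps r flag with
  | nil => rfl
  | cons i tl ih =>
    rw [List.foldl_cons]
    cases flag with
    | false =>
      rw [show pvPass (ps, r, false) i = (ps, r, false) from rfl]
      exact ih ps r false
    | true =>
      have h2 := ih (pvInnerM i ps r).1 (pvInnerM i ps r).2.1 (pvInnerM i ps r).2.2
      rw [show pvPass (ps, r, true) i
            = ((pvInnerM i ps r).1, (pvInnerM i ps r).2.1, (pvInnerM i ps r).2.2) from rfl, h2,
          pvInnerM_fst i ps r]

theorem pv_natCast_sum (l : List Nat) : ((l.sum : Nat) : Int) = (l.map (Nat.cast : Nat → Int)).sum := by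
  induction l with
  | nil => simp
  | cons x tl ih => simp [ih]

-- the counts dict both programs build, as an explicit pair list
theorem pv_counter_mk (t : List Int) :
    PySem.Dict.counter t
      = PySem.Dict.mk ((PySem.Set.ofList t).map (fun x => (x, (t.count x : Int)))) := by
  apply PySem.Dict.ext
  rw [PySem.Dict.items_counter]

theorem pv_ps0_fst (t : List Int) :
    ((PySem.Set.ofList t).map (fun x => (x, (t.count x : Int)))).map Prod.fst = PySem.Set.ofList t := by
  rw [List.map_map,
      show (Prod.fst ∘ fun x => (x, (t.count x : Int))) = id from rfl, List.map_id]

theorem pv_ps0_pos (t : List Int) :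
    ∀ p ∈ (PySem.Set.ofList t).map (fun x => (x, (t.count x : Int))), 1 ≤ p.2 := by
  intro p hp
  obtain ⟨x, hx, rfl⟩ := List.mem_map.mp hp
  have : x ∈ t := (PySem.Set.mem_ofList t x).mp hx
  have := List.count_pos_iff.mpr this
  simp only
  omega

theorem pv_ps0_sum (t : List Int) :
    (((PySem.Set.ofList t).map (fun x => (x, (t.count x : Int)))).map Prod.snd).sum = (t.length : Int) := by
  rw [List.map_map]
  rw [show (Prod.snd ∘ (fun x => (x, (t.count x : Int)))) = fun x => ((t.count x : Nat) : Int) from rfl]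
  have hperm : (PySem.Set.ofList t).Perm t.dedup := by
    rw [List.perm_ext_iff_of_nodup (PySem.Set.nodup_ofList t) t.nodup_dedup]
    intro a
    rw [PySem.Set.mem_ofList, List.mem_dedup]
  rw [(hperm.map (fun x => ((t.count x : Nat) : Int))).sum_eq]
  have e := pv_natCast_sum (t.dedup.map (fun x => t.count x))
  rw [List.map_map] at e
  rw [show (t.dedup.map fun x => ((t.count x : Nat) : Int))
        = t.dedup.map ((Nat.cast : Nat → Int) ∘ (fun x => t.count x)) from rfl]
  rw [← e, List.sum_map_count_dedup_eq_length]

-- closed forms of the two ports over the shared counts list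
theorem pv_solution_closed (k : Int) (t : List Int) :
    solution k t
      = (pvCnt (((PySem.List.pyRange 1 (t.length : Int)).foldl pvPass
          ((PySem.Set.ofList t).map (fun x => (x, (t.count x : Int))), (t.length : Int) - k, true)).1) : Int) := by
  simp only [solution]
  rw [pv_dict_build, pv_counter_mk,
      pv_outer_eq _ _ _ _ (by rw [pv_ps0_fst]; exact PySem.Set.nodup_ofList t)]
  exact pv_answer_eq _ (by rw [pv_fold_fst, pv_ps0_fst]; exact PySem.Set.nodup_ofList t)

theorem pv_alt_closed (k : Int) (t : List Int) :
    solution_alt k t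
      = (((PySem.Set.ofList t).map (fun x => (x, (t.count x : Int)))).length : Int)
        - ((pvGp ((t.length : Int) - k)
            (PySem.List.sorted ((((PySem.Set.ofList t).map (fun x => (x, (t.count x : Int)))).map Prod.snd)) (fun v => v))).1 : Int) := by
  simp only [solution_alt]
  rw [PySem.Dict.foldl_insert_getD_add_one_eq_counter, pv_counter_mk, PySem.Dict.values_mk,
      pvGreedy_eq_gp]
  rfl

theorem pv_fold_single (l : List Int) (j w r : Int) (flag : Bool) (hl : ∀ i ∈ l, i ≠ w) :
    (l.foldl pvPass ([(j, w)], r, flag)).1 = [(j, w)] := by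
  induction l generalizing r flag with
  | nil => rfl
  | cons i tl ih =>
    rw [List.foldl_cons]
    cases flag with
    | false =>
      rw [show pvPass ([(j, w)], r, false) i = ([(j, w)], r, false) from rfl]
      exact ih r false (fun x hx => hl x (by simp [hx]))
    | true =>
      have hne : w ≠ i := fun h => hl i (by simp) h.symm
      have hstep : pvPass ([(j, w)], r, true) i
          = if r = 0 then ([(j, w)], r, false) else ([(j, w)], r, true) := by
        show pvInnerM i [(j, w)] r = _
        by_cases hr : r = 0
        · simp [pvInnerM, hne, hr]
        · simp [pvInnerM, hne, hr]
      rw [hstep]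
      by_cases hr : r = 0
      · rw [if_pos hr]
        exact ih r false (fun x hx => hl x (by simp [hx]))
      · rw [if_neg hr]
        exact ih r true (fun x hx => hl x (by simp [hx]))

-- ===== VERDICT (by name: the statement is the Claim_ definition above) =====
theorem solution_spec : Claim_unchanged_solution := by
  intro k t _hdom hD
  show solution k t = solution_alt k t
  rw [pv_solution_closed, pv_alt_closed]
  cases t with
  | nil => simp [pvCnt, pvGp]
  | cons hd tl =>
    have h1 := pv_ps0_pos (hd :: tl)
    have hsum := pv_ps0_sum (hd :: tl)
    have hperm : (PySem.List.sorted ((((PySem.Set.ofList (hd :: tl)).map (fun x => (x, ((hd :: tl).count x : Int)))).map Prod.snd)) (fun v => v)).Perm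
        (((PySem.Set.ofList (hd :: tl)).map (fun x => (x, ((hd :: tl).count x : Int)))).map Prod.snd) :=
      PySem.List.sorted_perm _ _ false
    have hpos : ∀ c ∈ PySem.List.sorted ((((PySem.Set.ofList (hd :: tl)).map (fun x => (x, ((hd :: tl).count x : Int)))).map Prod.snd)) (fun v => v), 1 ≤ c := by
      intro c hc
      obtain ⟨p, hp, rfl⟩ := List.mem_map.mp (hperm.mem_iff.mp hc)
      exact h1 p hp
    by_cases hr0 : ((hd :: tl).length : Int) - k = 0
    · -- budget already 0: A freezes immediately, B removes nothing
      rw [hr0]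
      have hz := pv_fold_zero (PySem.List.pyRange 1 ((hd :: tl).length : Int))
        ((PySem.Set.ofList (hd :: tl)).map (fun x => (x, ((hd :: tl).count x : Int)))) true
        (fun i hi => ((PySem.List.mem_pyRange_one).mp hi).1)
      rw [hz.1]
      have hall : pvCnt ((PySem.Set.ofList (hd :: tl)).map (fun x => (x, ((hd :: tl).count x : Int))))
          = ((PySem.Set.ofList (hd :: tl)).map (fun x => (x, ((hd :: tl).count x : Int)))).length := by
        apply List.countP_eq_length.mpr
        intro p hp
        have := h1 p hp
        simp only [decide_eq_true_eq]
        omega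
      rw [hall, pvGp_stop 0 _ (fun c hc => by have := hpos c hc; omega)]
      simp
    · -- positive (or negative) budget: the invariant applies
      have hL : ((hd :: tl).length : Int) = ((tl.length : Nat) : Int) + 1 := by
        simp [List.length_cons]
      have h2 : ∀ p ∈ (PySem.Set.ofList (hd :: tl)).map (fun x => (x, ((hd :: tl).count x : Int))),
          p.2 ≤ ((tl.length : Nat) : Int) ∨ ((hd :: tl).length : Int) - k < p.2 := by
        intro p hp
        obtain ⟨x, hx, rfl⟩ := List.mem_map.mp hp
        simp only
        by_cases hc : ((hd :: tl).count x : Int) ≤ ((tl.length : Nat) : Int)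
        · exact Or.inl hc
        · right
          have hle : (hd :: tl).count x ≤ (hd :: tl).length := List.count_le_length
          have hcnt : (hd :: tl).count x = (hd :: tl).length := by
            simp only [List.length_cons] at hle ⊢
            omega
          have hallx : ∀ b ∈ (hd :: tl), x = b := List.count_eq_length.mp hcnt
          have hhd : ∀ y ∈ (hd :: tl), y = (hd :: tl).headI := by
            intro y hy
            rw [show (hd :: tl).headI = hd from rfl, ← hallx hd (by simp), ← hallx y hy]
          have hk : ¬ k ≤ 0 := fun hk0 => hD ⟨hk0, by simp, hhd⟩
          rw [hcnt]
          omega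
      have hmain := pv_main tl.length
        ((PySem.Set.ofList (hd :: tl)).map (fun x => (x, ((hd :: tl).count x : Int))))
        (((hd :: tl).length : Int) - k) h1 hr0 h2
      rw [← hL] at hmain
      omega

theorem solution_changed : Claim_changed_solution := by
  unfold Claim_changed_solution; decide

theorem solution_tight : Claim_exact_solution := by
  intro k t _hdom hD
  obtain ⟨hk, hne, hall⟩ := hD
  cases t with
  | nil => exact absurd rfl hne
  | cons hd tl =>
    have hallhd : ∀ x ∈ (hd :: tl), x = hd := by
      intro x hx
      simpa using hall x hx
    have hS : PySem.Set.ofList (hd :: tl) = [hd] := by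
      rw [PySem.Set.ofList_cons]
      have : PySem.Set.discard (PySem.Set.ofList tl) hd = [] := by
        rw [List.eq_nil_iff_forall_not_mem]
        intro y hy
        have hmem := (PySem.Set.mem_discard _ _ _).mp hy
        exact hmem.2 (hallhd y (by simp [(PySem.Set.mem_ofList tl y).mp hmem.1]))
      rw [this]
    have hcnt : (hd :: tl).count hd = (hd :: tl).length :=
      List.count_eq_length.mpr (fun b hb => (hallhd b hb).symm)
    rw [pv_solution_closed, pv_alt_closed, hS]
    have hone : ([hd].map (fun x => (x, ((hd :: tl).count x : Int))))
        = [(hd, ((hd :: tl).count hd : Int))] := by simp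
    rw [hone]
    have hA : ((PySem.List.pyRange 1 ((hd :: tl).length : Int)).foldl pvPass
        ([(hd, ((hd :: tl).count hd : Int))], ((hd :: tl).length : Int) - k, true)).1
        = [(hd, ((hd :: tl).count hd : Int))] := by
      apply pv_fold_single
      intro i hi
      have := (PySem.List.mem_pyRange_one).mp hi
      rw [hcnt]
      omega
    rw [hA]
    have hpos : 0 < (hd :: tl).count hd := List.count_pos_iff.mpr (by simp)
    have hcntA : pvCnt [(hd, ((hd :: tl).count hd : Int))] = 1 := by
      simp only [pvCnt, List.countP_cons, List.countP_nil]
      rw [if_pos (by simp; omega)]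
    rw [hcntA]
    have hsorted : PySem.List.sorted ([(hd, ((hd :: tl).count hd : Int))].map Prod.snd) (fun v => v)
        = [((hd :: tl).count hd : Int)] := by
      apply PySem.List.sorted_eq_self_of_pairwise
      simp
    rw [hsorted]
    have hbud : ((hd :: tl).count hd : Int) ≤ ((hd :: tl).length : Int) - k := by
      rw [hcnt]; omega
    have hgp : (pvGp (((hd :: tl).length : Int) - k) [((hd :: tl).count hd : Int)]).1 = 1 := by
      simp only [pvGp]
      rw [if_pos hbud]
    rw [hgp]
    simp
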